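-- pv_equiv track=rewrite | github.com/ankurbhambri/DS-Algo | array/meeting-rooms-II.py | solution
-- ===== SOURCE A (Python) =====
-- def solution(intervals):
--
--     events = []
--
--     for start, end in intervals:
--         events.append((start, 1))   # meeting starts
--         events.append((end, -1))    # meeting ends
--
--     # Sort events: by time, then by type (-1 before +1 if times are equal)
--     events.sort()
--
--     max_rooms = 0
--     ongoing = 0
--
--     for time, change in events:
--         ongoing += change
--         max_rooms = max(max_rooms, ongoing)
--
--     return max_rooms
-- ===== SOURCE B (Python) =====
-- def solution(intervals):
--     best = 0
--     for s, _ in intervals: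
--         c = 0
--         for a, b in intervals:
--             c += (a <= s) - (b <= s)
--         if c > best:
--             best = c
--     return best
-- ===== Notes on version B (the rewrite author's own statement) =====
-- stated objective: alternative
-- what changed: Replaces the sort-and-sweep over a (time, +/-1) event stream by direct quadratic counting: for each start time s it counts #(starts <= s) - #(ends <= s) and returns the maximum (floored at 0); correct because the sweep's running maximum is attained immediately after processing all events at some start time.
import Mathlib
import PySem

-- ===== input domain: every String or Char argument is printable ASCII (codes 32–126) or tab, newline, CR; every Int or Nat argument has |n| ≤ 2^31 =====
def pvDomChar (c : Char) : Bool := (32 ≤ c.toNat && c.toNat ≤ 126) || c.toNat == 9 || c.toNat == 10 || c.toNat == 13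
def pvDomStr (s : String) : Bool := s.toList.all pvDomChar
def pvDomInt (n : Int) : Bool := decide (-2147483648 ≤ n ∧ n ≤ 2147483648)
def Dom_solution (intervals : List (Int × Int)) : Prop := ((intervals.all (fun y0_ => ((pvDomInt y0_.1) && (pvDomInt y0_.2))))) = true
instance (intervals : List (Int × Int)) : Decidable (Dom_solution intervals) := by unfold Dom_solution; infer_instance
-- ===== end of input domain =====

-- B replaces A's sort-and-sweep over a (time, ±1) event stream by direct quadratic
-- counting over start times (objective: alternative algorithm, no sorting, O(n^2)).

-- ===== PORT A =====
-- A's loop state (max_rooms, ongoing); one event step: ongoing += change; max_rooms = max(max_rooms, ongoing)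
def stepA (st : Int × Int) (tc : Int × Int) : Int × Int :=
  (max st.1 (st.2 + tc.2), st.2 + tc.2)

def solution (intervals : List (Int × Int)) : Int :=
  let events := intervals.foldl (fun acc p => acc ++ [(p.1, (1 : Int))] ++ [(p.2, (-1 : Int))]) []
  let evSorted := PySem.List.sorted2 events Prod.fst Prod.snd
  (evSorted.foldl stepA (0, 0)).1

-- ===== PORT B =====
-- inner loop of Source B: c += (a <= s) - (b <= s) over all intervals
def countAt (intervals : List (Int × Int)) (s : Int) : Int :=
  intervals.foldl
    (fun c p => c + ((if p.1 ≤ s then (1 : Int) else 0) - (if p.2 ≤ s then (1 : Int) else 0))) 0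

def solution_alt (intervals : List (Int × Int)) : Int :=
  intervals.foldl
    (fun best p => let c := countAt intervals p.1; if c > best then c else best) 0

-- ===== PRECONDITION & SPEC =====
def Spec_solution (intervals : List (Int × Int)) (out : Int) : Prop := out = solution_alt intervals
instance (intervals : List (Int × Int)) (out : Int) : Decidable (Spec_solution intervals out) := by unfold Spec_solution; infer_instance

-- ===== CLAIM (what is proved, stated in full; the proofs are below) =====
def Claim_equal_solution : Prop := ∀ (intervals : List (Int × Int)), Dom_solution intervals → Spec_solution intervals (solution intervals)

-- ===== LEMMAS AND PROOFS =====

-- Python's lexicographic ≤ on (time, change) pairs (abbrev so decidability is inferred)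
abbrev lexLe (a b : Int × Int) : Prop := a.1 < b.1 ∨ (a.1 = b.1 ∧ a.2 ≤ b.2)

-- per-interval event pair, and the (unsorted) event list
def evPair (p : Int × Int) : List (Int × Int) := [(p.1, (1 : Int)), (p.2, (-1 : Int))]

-- sum of changes of all events lexicographically ≤ x
def gSum (L : List (Int × Int)) (x : Int × Int) : Int :=
  (L.map (fun e => if lexLe e x then e.2 else 0)).sum

theorem lexLe_antisymm {a b : Int × Int} (h1 : lexLe a b) (h2 : lexLe b a) : a = b := by
  unfold lexLe at *
  rcases a with ⟨a1, a2⟩; rcases b with ⟨b1, b2⟩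
  simp only [Prod.mk.injEq]
  omega

-- insertion with Python's lexicographic tuple-< preserves lexLe-sortedness
theorem insertBy_pairwise_lexLe (x : Int × Int) : ∀ ys : List (Int × Int),
    ys.Pairwise lexLe →
    (PySem.List.insertBy
        (fun a b => decide (a.1 < b.1) || (!decide (b.1 < a.1) && decide (a.2 < b.2))) x ys).Pairwise lexLe := by
  intro ys
  induction ys with
  | nil => intro _; simp [PySem.List.insertBy]
  | cons y ys ih =>
      intro hp
      rw [List.pairwise_cons] at hp
      by_cases hb : (decide (x.1 < y.1) || (!decide (y.1 < x.1) && decide (x.2 < y.2))) = true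
      · simp only [PySem.List.insertBy, hb, if_pos]
        have hxy : lexLe x y := by
          simp only [Bool.or_eq_true, Bool.and_eq_true, Bool.not_eq_true', decide_eq_true_eq,
            decide_eq_false_iff_not] at hb
          unfold lexLe; omega
        refine List.pairwise_cons.mpr ⟨?_, List.pairwise_cons.mpr hp⟩
        intro z hz
        rcases List.mem_cons.mp hz with rfl | hmem
        · exact hxy
        · have := hp.1 z hmem
          unfold lexLe at *; omega
      · simp only [PySem.List.insertBy, hb, if_neg, Bool.false_eq_true, not_false_iff]
        refine List.pairwise_cons.mpr ⟨?_, ih hp.2⟩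
        intro z hz
        rcases (PySem.List.mem_insertBy _ _ _ _).mp hz with rfl | hmem
        · simp only [Bool.or_eq_true, Bool.and_eq_true, Bool.not_eq_true', decide_eq_true_eq,
            decide_eq_false_iff_not, not_or, not_and] at hb
          unfold lexLe; omega
        · exact hp.1 z hmem

theorem foldl_insertBy_pairwise : ∀ (xs acc : List (Int × Int)), acc.Pairwise lexLe →
    (xs.foldl (fun acc x => PySem.List.insertBy
        (fun a b => decide (a.1 < b.1) || (!decide (b.1 < a.1) && decide (a.2 < b.2))) x acc) acc).Pairwise lexLe := by
  intro xs
  induction xs with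
  | nil => intro acc h; simpa using h
  | cons x xs ih =>
      intro acc h
      simpa [List.foldl_cons] using ih _ (insertBy_pairwise_lexLe x acc h)

theorem sorted2_pairwise_lexLe (xs : List (Int × Int)) :
    (PySem.List.sorted2 xs Prod.fst Prod.snd).Pairwise lexLe := by
  exact foldl_insertBy_pairwise xs [] (by simp)

theorem events_flatMap (intervals : List (Int × Int)) :
    intervals.foldl (fun acc p => acc ++ [(p.1, (1 : Int))] ++ [(p.2, (-1 : Int))]) [] =
      intervals.flatMap evPair := by
  simpa [evPair, List.append_assoc, List.singleton_append] using
    PySem.List.foldl_append_eq_flatMap (fun p : Int × Int => [(p.1, (1 : Int)), (p.2, (-1 : Int))]) intervals []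

-- ---- generic facts about foldl-of-max ----

theorem foldl_max_absorb {α : Type} (h : α → Int) :
    ∀ (t : List α) (m b : Int),
      t.foldl (fun acc x => max acc (h x)) (max m b) =
        max (t.foldl (fun acc x => max acc (h x)) m) b := by
  intro t
  induction t with
  | nil => intro m b; rfl
  | cons a t ih =>
      intro m b
      simp only [List.foldl_cons]
      rw [show max (max m b) (h a) = max (max m (h a)) b by
        rw [max_right_comm], ih]

theorem le_foldl_max_init {α : Type} (h : α → Int) :
    ∀ (t : List α) (m : Int), m ≤ t.foldl (fun acc x => max acc (h x)) m := by
  intro t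
  induction t with
  | nil => intro m; exact le_refl m
  | cons a t ih =>
      intro m
      exact le_trans (le_max_left m (h a)) (ih _)

theorem foldl_max_le_of_mem {α : Type} (h : α → Int) {x : α} :
    ∀ {t : List α}, x ∈ t → ∀ m : Int, h x ≤ t.foldl (fun acc x => max acc (h x)) m := by
  intro t
  induction t with
  | nil => intro hx; cases hx
  | cons a t ih =>
      intro hx m
      rcases List.mem_cons.mp hx with rfl | hmem
      · exact le_trans (le_max_right m (h x)) (le_foldl_max_init h t _)
      · exact ih hmem _
  
theorem foldl_max_le {α : Type} (h : α → Int) {K : Int} :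
    ∀ (t : List α) (m : Int), m ≤ K → (∀ x ∈ t, h x ≤ K) →
      t.foldl (fun acc x => max acc (h x)) m ≤ K := by
  intro t
  induction t with
  | nil => intro m hm _; exact hm
  | cons a t ih =>
      intro m hm ht
      refine ih _ (max_le hm (ht a List.mem_cons_self)) ?_
      intro x hx; exact ht x (List.mem_cons_of_mem a hx)

theorem foldl_max_perm {α : Type} (h : α → Int) {t₁ t₂ : List α} (hp : t₁.Perm t₂) :
    ∀ m : Int, t₁.foldl (fun acc x => max acc (h x)) m = t₂.foldl (fun acc x => max acc (h x)) m := by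
  induction hp with
  | nil => intro m; rfl
  | cons a _ ih => intro m; simp only [List.foldl_cons]; exact ih _
  | swap a b _ => intro m; simp only [List.foldl_cons]; rw [max_right_comm]
  | trans _ _ ih1 ih2 => intro m; rw [ih1 m, ih2 m]

-- ---- gSum facts ----

theorem gSum_perm {L₁ L₂ : List (Int × Int)} (hp : L₁.Perm L₂) (x : Int × Int) :
    gSum L₁ x = gSum L₂ x :=
  (hp.map _).sum_eq

theorem gSum_cons_of_head_le (a : Int × Int) (t : List (Int × Int)) (x : Int × Int)
    (hax : lexLe a x) : gSum (a :: t) x = a.2 + gSum t x := by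
  simp [gSum, if_pos hax]

theorem gSum_self_of_pairwise (a : Int × Int) :
    ∀ t : List (Int × Int), (∀ e ∈ t, lexLe a e) →
      gSum t a = (t.count a : Int) * a.2 := by
  intro t
  induction t with
  | nil => intro _; simp [gSum]
  | cons e t ih =>
      intro hall
      have hrest : gSum t a = (t.count a : Int) * a.2 :=
        ih (fun y hy => hall y (List.mem_cons_of_mem e hy))
      by_cases he : lexLe e a
      · have hea : e = a := lexLe_antisymm he (hall e List.mem_cons_self)
        rw [gSum_cons_of_head_le e t a he, hrest, hea, List.count_cons_self]
        push_cast; ring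
      · have hne : e ≠ a := by
          intro hcontra; subst hcontra
          exact he (Or.inr ⟨rfl, le_refl _⟩)
        have : gSum (e :: t) a = gSum t a := by simp [gSum, if_neg he]
        rw [this, hrest, List.count_cons_of_ne hne]

-- ---- the sweep characterization: A's fold over a sorted ±1 event list ----

theorem foldA_eq : ∀ L : List (Int × Int), L.Pairwise lexLe →
    (∀ x ∈ L, x.2 = 1 ∨ x.2 = -1) →
    ∀ m o : Int, o ≤ m →
      (L.foldl stepA (m, o)).1 = L.foldl (fun acc x => max acc (o + gSum L x)) m := by
  intro L
  induction L with
  | nil => intro _ _ m o _; rfl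
  | cons a t ih =>
      intro hs hpm m o hom
      have hhead : ∀ e ∈ t, lexLe a e := (List.pairwise_cons.mp hs).1
      have htail : t.Pairwise lexLe := (List.pairwise_cons.mp hs).2
      have hpmt : ∀ x ∈ t, x.2 = 1 ∨ x.2 = -1 :=
        fun x hx => hpm x (List.mem_cons_of_mem a hx)
      have hcount : gSum t a = (t.count a : Int) * a.2 := gSum_self_of_pairwise a t hhead
      -- LHS
      have hlhs : ((a :: t).foldl stepA (m, o)).1 =
          t.foldl (fun acc x => max acc ((o + a.2) + gSum t x)) (max m (o + a.2)) := by
        simp only [List.foldl_cons, stepA]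
        exact ih htail hpmt (max m (o + a.2)) (o + a.2) (le_max_right _ _)
      -- RHS: rewrite gSum (a::t) x for members of t, and the head term
      have hrhs : (a :: t).foldl (fun acc x => max acc (o + gSum (a :: t) x)) m =
          t.foldl (fun acc x => max acc ((o + a.2) + gSum t x))
            (max m (o + a.2 + (t.count a : Int) * a.2)) := by
        simp only [List.foldl_cons]
        rw [gSum_cons_of_head_le a t a (Or.inr ⟨rfl, le_refl _⟩), hcount,
          show o + (a.2 + (t.count a : Int) * a.2) = o + a.2 + (t.count a : Int) * a.2 by ring]
        refine PySem.List.foldl_congr_mem _ _ _ _ ?_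
        intro acc x hx
        rw [gSum_cons_of_head_le a t x (hhead x hx), ← add_assoc]
      rw [hlhs, hrhs]
      rcases hpm a List.mem_cons_self with h1 | h1
      · -- a.2 = 1
        rw [h1]
        set c : Int := (t.count a : Int) with hc
        have hc0 : 0 ≤ c := by positivity
        by_cases hcz : t.count a = 0
        · simp [hc, hcz]
        · have hmem : a ∈ t := List.count_pos_iff.mp (Nat.pos_of_ne_zero hcz)
          have hcpos : 1 ≤ c := by
            simp only [hc]; exact_mod_cast Nat.one_le_iff_ne_zero.mpr hcz
          have hsplit : max m (o + 1 + c * 1) = max (max m (o + 1)) (o + 1 + c) := by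
            rw [max_assoc]
            congr 1
            rw [max_eq_right (by linarith)]
            ring_nf
          have hterm : (o + 1) + gSum t a ≤
              t.foldl (fun acc x => max acc ((o + 1) + gSum t x)) (max m (o + 1)) :=
            @foldl_max_le_of_mem (Int × Int) (fun x => (o + 1) + gSum t x) a t hmem (max m (o + 1))
          rw [hcount, h1, mul_one] at hterm
          rw [hsplit,
            show t.foldl (fun acc x => max acc ((o + 1) + gSum t x)) (max (max m (o + 1)) (o + 1 + c)) =
              max (t.foldl (fun acc x => max acc ((o + 1) + gSum t x)) (max m (o + 1))) (o + 1 + c) from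
              @foldl_max_absorb (Int × Int) (fun x => (o + 1) + gSum t x) t (max m (o + 1)) (o + 1 + c)]
          exact (max_eq_left hterm).symm
      · -- a.2 = -1 : both initial extra terms are below m
        rw [h1]
        have h2 : max m (o + -1) = m := max_eq_left (by omega)
        have h3 : max m (o + -1 + (t.count a : Int) * -1) = m := by
          have : (0:Int) ≤ (t.count a : Int) := by positivity
          exact max_eq_left (by nlinarith)
        rw [h2, h3]

-- ---- gSum on the event list, per kind of event ----

theorem gSum_events_start (I : List (Int × Int)) (s : Int) :
    gSum (I.flatMap evPair) (s, 1) =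
      (I.map (fun p => (if p.1 ≤ s then (1 : Int) else 0) - (if p.2 ≤ s then (1 : Int) else 0))).sum := by
  induction I with
  | nil => rfl
  | cons p t ih =>
      simp only [List.flatMap_cons, evPair, gSum, List.map_append, List.sum_append,
        List.map_cons, List.sum_cons, List.map_nil, List.sum_nil] at *
      rw [ih]
      have h1 : (if lexLe (p.1, (1:Int)) (s, 1) then (1:Int) else 0) = if p.1 ≤ s then 1 else 0 := by
        unfold lexLe; split_ifs <;> simp_all <;> omega
      have h2 : (if lexLe (p.2, (-1:Int)) (s, 1) then (-1:Int) else 0) =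
          -(if p.2 ≤ s then (1:Int) else 0) := by
        unfold lexLe; split_ifs <;> simp_all <;> omega
      simp only [h1, h2]
      ring

theorem gSum_events_end (I : List (Int × Int)) (e : Int) :
    gSum (I.flatMap evPair) (e, -1) =
      (I.map (fun p => (if p.1 < e then (1 : Int) else 0) - (if p.2 ≤ e then (1 : Int) else 0))).sum := by
  induction I with
  | nil => rfl
  | cons p t ih =>
      simp only [List.flatMap_cons, evPair, gSum, List.map_append, List.sum_append,
        List.map_cons, List.sum_cons, List.map_nil, List.sum_nil] at *
      rw [ih]
      have h1 : (if lexLe (p.1, (1:Int)) (e, -1) then (1:Int) else 0) = if p.1 < e then 1 else 0 := by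
        unfold lexLe; split_ifs <;> simp_all
      have h2 : (if lexLe (p.2, (-1:Int)) (e, -1) then (-1:Int) else 0) =
          -(if p.2 ≤ e then (1:Int) else 0) := by
        unfold lexLe; split_ifs <;> simp_all <;> omega
      simp only [h1, h2]
      ring

theorem countAt_eq_sum (I : List (Int × Int)) (s : Int) :
    countAt I s =
      (I.map (fun p => (if p.1 ≤ s then (1 : Int) else 0) - (if p.2 ≤ s then (1 : Int) else 0))).sum := by
  unfold countAt
  rw [PySem.List.foldl_add]
  ring

-- B's outer fold, with the if written as a max
theorem solution_alt_eq_foldl_max (I : List (Int × Int)) :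
    solution_alt I = I.foldl (fun best p => max best (countAt I p.1)) 0 := by
  unfold solution_alt
  refine PySem.List.foldl_congr_mem _ _ _ _ ?_
  intro acc p _
  simp only [max_def]
  split_ifs <;> omega

-- membership in the event list
theorem mem_events {x : Int × Int} {I : List (Int × Int)} (hx : x ∈ I.flatMap evPair) :
    ∃ p ∈ I, x = (p.1, 1) ∨ x = (p.2, -1) := by
  rcases List.mem_flatMap.mp hx with ⟨p, hp, hxp⟩
  refine ⟨p, hp, ?_⟩
  simp only [evPair, List.mem_cons, List.not_mem_nil, or_false] at hxp
  exact hxp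

theorem events_pm {x : Int × Int} {I : List (Int × Int)} (hx : x ∈ I.flatMap evPair) :
    x.2 = 1 ∨ x.2 = -1 := by
  rcases mem_events hx with ⟨p, _, rfl | rfl⟩
  · exact Or.inl rfl
  · exact Or.inr rfl

-- the end-event bound: an end event never exceeds B's answer
theorem gSum_end_le (I : List (Int × Int)) (e : Int) :
    gSum (I.flatMap evPair) (e, -1) ≤ I.foldl (fun best p => max best (countAt I p.1)) 0 := by
  set Y := I.foldl (fun best p => max best (countAt I p.1)) 0 with hY
  have hY0 : (0 : Int) ≤ Y := @le_foldl_max_init (Int × Int) (fun p => countAt I p.1) I 0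
  rw [gSum_events_end]
  set l := (I.map Prod.fst).filter (fun t => decide (t < e)) with hl
  by_cases hnil : l = []
  · -- no start is < e: the sum is ≤ 0
    have hle0 : (I.map (fun p => (if p.1 < e then (1 : Int) else 0) - (if p.2 ≤ e then (1 : Int) else 0))).sum ≤
        (I.map (fun _ => (0 : Int))).sum := by
      refine List.sum_le_sum ?_
      intro p hp
      have hnlt : ¬ p.1 < e := by
        intro hlt
        have : p.1 ∈ l := by
          rw [hl]; exact List.mem_filter.mpr ⟨List.mem_map.mpr ⟨p, hp, rfl⟩, by simpa using hlt⟩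
        rw [hnil] at this; cases this
      split_ifs <;> omega
    refine le_trans hle0 ?_
    simpa using hY0
  · -- pick the greatest start below e
    rcases hmx : l.maximum with _ | s'
    · exact absurd (List.maximum_eq_bot.mp hmx) hnil
    have hs'mem : s' ∈ l := List.maximum_mem hmx
    have hs'max : ∀ t ∈ l, t ≤ s' := fun t ht => List.le_maximum_of_mem ht hmx
    have hs'lt : s' < e := by
      have := (List.mem_filter.mp (hl ▸ hs'mem)).2
      simpa using this
    rcases List.mem_map.mp (List.mem_filter.mp (hl ▸ hs'mem)).1 with ⟨p₀, hp₀, hp₀1⟩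
    -- pointwise bound by countAt I s'
    have hsum : (I.map (fun p => (if p.1 < e then (1 : Int) else 0) - (if p.2 ≤ e then (1 : Int) else 0))).sum ≤
        (I.map (fun p => (if p.1 ≤ s' then (1 : Int) else 0) - (if p.2 ≤ s' then (1 : Int) else 0))).sum := by
      refine List.sum_le_sum ?_
      intro p hp
      have himp1 : p.1 < e → p.1 ≤ s' := by
        intro hlt
        exact hs'max p.1 (by
          rw [hl]; exact List.mem_filter.mpr ⟨List.mem_map.mpr ⟨p, hp, rfl⟩, by simpa using hlt⟩)
      have himp2 : p.2 ≤ s' → p.2 ≤ e := fun h => le_of_lt (lt_of_le_of_lt h hs'lt)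
      split_ifs <;> omega
    refine le_trans hsum ?_
    rw [← countAt_eq_sum]
    have hcc : countAt I s' = countAt I p₀.1 := by rw [hp₀1]
    rw [hcc, hY]
    exact @foldl_max_le_of_mem (Int × Int) (fun p => countAt I p.1) p₀ I hp₀ 0

-- ===== VERDICT (by name: the statement is the Claim_ definition above) =====
theorem solution_spec : Claim_equal_solution := by
  intro I _
  unfold Spec_solution solution
  simp only
  rw [events_flatMap]
  set E := I.flatMap evPair with hE
  set S := PySem.List.sorted2 E Prod.fst Prod.snd with hS
  have hperm : S.Perm E := PySem.List.sorted2_perm E Prod.fst Prod.snd false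
  have hfold := foldA_eq S (sorted2_pairwise_lexLe E)
    (fun x hx => events_pm (hperm.mem_iff.mp hx)) 0 0 (le_refl 0)
  rw [hfold]
  have hcong : S.foldl (fun acc x => max acc (0 + gSum S x)) 0 =
      S.foldl (fun acc x => max acc (gSum E x)) 0 := by
    refine PySem.List.foldl_congr_mem _ _ _ _ ?_
    intro acc x _
    rw [gSum_perm hperm x]; ring_nf
  rw [hcong, @foldl_max_perm (Int × Int) (fun x => gSum E x) S E hperm 0]
  rw [solution_alt_eq_foldl_max]
  set Y := I.foldl (fun best p => max best (countAt I p.1)) 0 with hY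
  apply le_antisymm
  · refine @foldl_max_le (Int × Int) (fun x => gSum E x) _ E 0
      (@le_foldl_max_init (Int × Int) (fun p => countAt I p.1) I 0) ?_
    intro x hx
    rcases mem_events hx with ⟨p, hp, rfl | rfl⟩
    · show gSum E (p.1, 1) ≤ Y
      rw [hE, gSum_events_start, ← countAt_eq_sum]
      exact @foldl_max_le_of_mem (Int × Int) (fun p => countAt I p.1) p I hp 0
    · show gSum E (p.2, -1) ≤ Y
      rw [hE]
      exact gSum_end_le I p.2
  · refine @foldl_max_le (Int × Int) (fun p => countAt I p.1) _ I 0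
      (@le_foldl_max_init (Int × Int) (fun x => gSum E x) E 0) ?_
    intro p hp
    show countAt I p.1 ≤ E.foldl (fun acc x => max acc (gSum E x)) 0
    rw [countAt_eq_sum, ← gSum_events_start]
    show gSum E (p.1, 1) ≤ E.foldl (fun acc x => max acc (gSum E x)) 0
    exact @foldl_max_le_of_mem (Int × Int) (fun x => gSum E x) (p.1, 1) E
      (List.mem_flatMap.mpr ⟨p, hp, by simp [evPair]⟩) 0
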